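-- pv_equiv track=rewrite | github.com/andcavan/PDM-SW | pdm_sw/sldreg_manager.py | _minimize_cleanup_keys
-- ===== SOURCE A (Python) =====
-- def _is_registry_parent(parent_key: str, child_key: str) -> bool:
--     p = parent_key.rstrip("\\").casefold()
--     c = child_key.rstrip("\\").casefold()
--     return c == p or c.startswith(f"{p}\\")
--
-- def _minimize_cleanup_keys(raw_keys: list[str]) -> list[str]:
--     unique_keys: list[str] = []
--     seen: set[str] = set()
--     for key in raw_keys:
--         normalized = key.strip()
--         if not normalized:
--             continue
--         low = normalized.casefold()
--         if low in seen:
--             continue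
--         seen.add(low)
--         unique_keys.append(normalized)
--
--     minimized: list[str] = []
--     for key in sorted(unique_keys, key=lambda item: (item.count("\\"), len(item), item.casefold())):
--         if any(_is_registry_parent(existing, key) for existing in minimized):
--             continue
--         minimized.append(key)
--     return minimized
-- ===== SOURCE B (Python) =====
-- def _minimize_cleanup_keys(raw_keys: list[str]) -> list[str]:
--     # Dedup: first stripped spelling per casefolded key, via an insertion-ordered dict.
--     first_by_fold: dict[str, str] = {}
--     for key in raw_keys:
--         normalized = key.strip()
--         if normalized:
--             first_by_fold.setdefault(normalized.casefold(), normalized)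
--     unique = list(first_by_fold.values())
--
--     def is_ancestor(np: str, nk: str) -> bool:
--         return nk.startswith(np) and (len(nk) == len(np) or nk[len(np)] == "\\")
--
--     # Precompute each key's sort triple and normalized form once.
--     keyed = [(k.count("\\"), len(k), k.casefold(), k.rstrip("\\").casefold(), k)
--              for k in unique]
--     # Closed-form keep test: no accumulator — a key survives iff no unique key
--     # whose sort triple is strictly smaller is its registry ancestor.
--     kept = [k for (c, l, f, nk, k) in keyed
--             if not any((c2, l2, f2) < (c, l, f) and is_ancestor(n2, nk)
--                        for (c2, l2, f2, n2, _p) in keyed)]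
--     return sorted(kept, key=lambda s: (s.count("\\"), len(s), s.casefold()))
-- ===== Notes on version B (the rewrite author's own statement) =====
-- stated objective: alternative
-- what changed: Replaces the greedy accumulator scan over the sorted list (membership test against the output built so far) with an order-independent closed-form keep predicate -- a key survives iff no unique key with a strictly smaller sort triple is its registry ancestor -- filtering before sorting, plus dict-setdefault dedup and a char-level prefix/boundary ancestor test instead of rstrip+startswith string building.
import Mathlib
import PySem

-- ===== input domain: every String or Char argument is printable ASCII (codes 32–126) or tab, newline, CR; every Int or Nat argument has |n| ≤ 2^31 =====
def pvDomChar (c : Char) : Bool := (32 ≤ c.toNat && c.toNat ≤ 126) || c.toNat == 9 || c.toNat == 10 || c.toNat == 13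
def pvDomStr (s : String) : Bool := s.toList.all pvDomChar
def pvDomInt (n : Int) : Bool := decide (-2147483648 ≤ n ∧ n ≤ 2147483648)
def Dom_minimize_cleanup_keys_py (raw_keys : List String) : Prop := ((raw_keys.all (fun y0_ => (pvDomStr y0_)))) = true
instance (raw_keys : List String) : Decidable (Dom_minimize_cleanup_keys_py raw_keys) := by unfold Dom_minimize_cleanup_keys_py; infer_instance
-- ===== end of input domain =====

-- B replaces A's greedy accumulator scan by an order-independent keep predicate
-- (filter before sorting) with dict-setdefault dedup; objective: alternative decomposition, same cost.

-- ===== PORT A =====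
-- hand port of s.rstrip("\\") (strip set = the single char '\\'): exact — drops trailing backslashes
def pvRstripBS (cs : List Char) : List Char := (cs.reverse.dropWhile (· == '\\')).reverse

-- key.rstrip("\\").casefold(); casefold ported as lower, exact on the ASCII domain
def pvNorm (s : String) : List Char := PySem.Chars.lower (pvRstripBS s.toList)

def is_registry_parent_py (parent_key child_key : String) : Bool :=
  let p := pvNorm parent_key
  let c := pvNorm child_key
  c == p || PySem.Chars.startswith c (p ++ ['\\'])

-- Python's sort key (item.count("\\"), len(item), item.casefold()) encoded as a List Nat
-- compared lexicographically — exactly Python's tuple comparison (str compare = code-point lex)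
def pvSortKey (s : String) : List Nat :=
  (PySem.Str.count s "\\") :: s.toList.length :: ((PySem.Str.lower s).toList.map Char.toNat)

-- sorted(..., key=pvSortKey); the lexicographic order on List Nat spelled with the
-- LinearOrder instance (same order as the default LT instance)
def pvSortedByKey (xs : List String) : List String :=
  @PySem.List.sorted String (List Nat)
    (@Preorder.toLT _ (@PartialOrder.toPreorder _ (@LinearOrder.toPartialOrder _ List.instLinearOrder)))
    (@LinearOrder.toDecidableLT _ List.instLinearOrder)
    xs pvSortKey false

def minimize_cleanup_keys_py (raw_keys : List String) : List String :=
  let st := raw_keys.foldl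
    (fun (st : List String × PySem.Set String) key =>
      let normalized := PySem.Str.strip key
      if normalized == "" then st
      else
        let low := PySem.Str.lower normalized   -- casefold = lower on the ASCII domain
        if PySem.Set.contains st.2 low then st
        else (st.1 ++ [normalized], PySem.Set.add st.2 low))
    ([], PySem.Set.empty)
  (pvSortedByKey st.1).foldl
    (fun minimized key =>
      if minimized.any (fun existing => is_registry_parent_py existing key) then minimized
      else minimized ++ [key]) []

-- ===== PORT B =====
-- is_ancestor(np, nk): nk.startswith(np) and (len(nk) == len(np) or nk[len(np)] == "\\")
-- (the index is in range whenever Python evaluates it; ported with [·]? = some '\\', exact)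
def pvIsAncestor (np nk : List Char) : Bool :=
  PySem.Chars.startswith nk np && (nk.length == np.length || nk[np.length]? == some '\\')

-- keyed entry (c, l, f, nk, k): the sort triple (c, l, f) is kept in its List Nat
-- encoding pvSortKey k (same lexicographic comparison as Python's tuple <)
def minimize_cleanup_keys_py_alt (raw_keys : List String) : List String :=
  let d := raw_keys.foldl
    (fun (d : PySem.Dict String String) key =>
      let normalized := PySem.Str.strip key
      if normalized == "" then d
      else d.setdefault (PySem.Str.lower normalized) normalized)
    PySem.Dict.empty
  let unique := d.values
  let keyed := unique.map (fun k => (pvSortKey k, pvNorm k, k))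
  let kept := (keyed.filter (fun t =>
      ! keyed.any (fun s => decide (s.1 < t.1) && pvIsAncestor s.2.1 t.2.1))).map
    (fun t => t.2.2)
  pvSortedByKey kept

-- ===== PRECONDITION & SPEC =====
def Spec_minimize_cleanup_keys_py (raw_keys : List String) (out : List String) : Prop := out = minimize_cleanup_keys_py_alt raw_keys
instance (raw_keys : List String) (out : List String) : Decidable (Spec_minimize_cleanup_keys_py raw_keys out) := by unfold Spec_minimize_cleanup_keys_py; infer_instance

-- ===== CLAIM (what is proved, stated in full; the proofs are below) =====
def Claim_equal_minimize_cleanup_keys_py : Prop := ∀ (raw_keys : List String), Dom_minimize_cleanup_keys_py raw_keys → Spec_minimize_cleanup_keys_py raw_keys (minimize_cleanup_keys_py raw_keys)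

-- ===== LEMMAS AND PROOFS =====

-- the registry-parent relation, as a Prop on normalized char lists
theorem pv_parent_iff (a b : String) :
    is_registry_parent_py a b = true ↔ (pvNorm b = pvNorm a ∨ pvNorm a ++ ['\\'] <+: pvNorm b) := by
  simp [is_registry_parent_py, PySem.Chars.startswith_iff]

theorem pv_parent_trans (a b c : String) (hab : is_registry_parent_py a b = true)
    (hbc : is_registry_parent_py b c = true) : is_registry_parent_py a c = true := by
  rw [pv_parent_iff] at *
  rcases hab with hab | hab <;> rcases hbc with hbc | hbc
  · exact Or.inl (hbc.trans hab)
  · exact Or.inr (hab ▸ hbc)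
  · exact Or.inr (hbc ▸ hab)
  · exact Or.inr (hab.trans ((List.prefix_append _ _).trans hbc))

-- B's char-level ancestor test agrees with A's string test on every pair
theorem pv_anc_eq (p k : String) : pvIsAncestor (pvNorm p) (pvNorm k) = is_registry_parent_py p k := by
  rw [Bool.eq_iff_iff, pv_parent_iff]
  simp only [pvIsAncestor, Bool.and_eq_true, Bool.or_eq_true, beq_iff_eq,
    PySem.Chars.startswith_iff]
  constructor
  · rintro ⟨hp, hlen | hidx⟩
    · exact Or.inl (hp.eq_of_length hlen.symm).symm
    · obtain ⟨t, ht⟩ := hp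
      rw [← ht] at hidx ⊢
      rw [List.getElem?_append_right (le_refl _)] at hidx
      simp only [Nat.sub_self] at hidx
      cases t with
      | nil => simp at hidx
      | cons c t' =>
        simp only [List.getElem?_cons_zero, Option.some.injEq] at hidx
        subst hidx
        exact Or.inr ⟨t', by simp⟩
  · rintro (h | h)
    · rw [h]; exact ⟨List.prefix_refl _, Or.inl rfl⟩
    · obtain ⟨t, ht⟩ := h
      rw [List.append_assoc] at ht
      rw [← ht]
      refine ⟨⟨'\\' :: t, by simp⟩, Or.inr ?_⟩
      rw [List.getElem?_append_right (le_refl _)]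
      simp

-- the keep predicate of B, over a pool u
def pvQ (u : List String) (k : String) : Bool :=
  ! u.any (fun p => decide (pvSortKey p < pvSortKey k) && is_registry_parent_py p k)

-- A's greedy accumulator pass over a strictly key-sorted list IS the filter by pvQ
theorem pv_greedy (L : List String)
    (hpw : List.Pairwise (fun a b => pvSortKey a < pvSortKey b) L) :
    ∀ (s done acc : List String), L = done ++ s →
    (∀ k, acc.any (fun e => is_registry_parent_py e k)
          = done.any (fun e => is_registry_parent_py e k)) →
    s.foldl (fun minimized key =>
        if minimized.any (fun existing => is_registry_parent_py existing key) then minimized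
        else minimized ++ [key]) acc
      = acc ++ s.filter (pvQ L) := by
  intro s
  induction s with
  | nil => intro done acc _ _; simp
  | cons x rest ih =>
    intro done acc hL hacc
    subst hL
    have hpw' := hpw
    rw [List.pairwise_append] at hpw'
    obtain ⟨hpwd, hpwc, hcross⟩ := hpw'
    rw [List.pairwise_cons] at hpwc
    obtain ⟨hxrest, hpwrest⟩ := hpwc
    -- the earlier-kept test equals the global small-key test at x
    have hC : done.any (fun e => is_registry_parent_py e x) = ! pvQ (done ++ x :: rest) x := by
      rw [Bool.eq_iff_iff]
      simp only [pvQ, Bool.not_not, List.any_eq_true, Bool.and_eq_true, decide_eq_true_eq]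
      constructor
      · rintro ⟨e, he, hpa⟩
        exact ⟨e, List.mem_append_left _ he, hcross e he x List.mem_cons_self, hpa⟩
      · rintro ⟨p, hp, hlt, hpa⟩
        rcases List.mem_append.mp hp with hp | hp
        · exact ⟨p, hp, hpa⟩
        · rcases List.mem_cons.mp hp with rfl | hp
          · exact absurd hlt (lt_irrefl _)
          · exact absurd hlt (not_lt_of_gt (hxrest p hp))
    rw [List.foldl_cons]
    by_cases hkeep : done.any (fun e => is_registry_parent_py e x) = true
    · -- x is dropped
      have hcond : acc.any (fun e => is_registry_parent_py e x) = true := (hacc x).trans hkeep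
      rw [if_pos hcond]
      have hQx : pvQ (done ++ x :: rest) x = false := by
        rw [← Bool.not_not (pvQ _ x), ← hC, hkeep]; rfl
      have hstep : ∀ k, acc.any (fun e => is_registry_parent_py e k)
          = (done ++ [x]).any (fun e => is_registry_parent_py e k) := by
        intro k
        rw [hacc k, List.any_append]
        cases hpx : is_registry_parent_py x k with
        | false => simp [hpx]
        | true =>
          obtain ⟨e, he, hpa⟩ := List.any_eq_true.mp hkeep
          have hda : done.any (fun e => is_registry_parent_py e k) = true :=
            List.any_eq_true.mpr ⟨e, he, pv_parent_trans e x k hpa hpx⟩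
          simp [hda, hpx]
      rw [ih (done ++ [x]) acc (by simp) hstep, List.filter_cons, hQx]
      simp
    · -- x is kept
      rw [Bool.not_eq_true] at hkeep
      have hcond : acc.any (fun e => is_registry_parent_py e x) = false := (hacc x).trans hkeep
      rw [if_neg (by simp [hcond])]
      have hQx : pvQ (done ++ x :: rest) x = true := by
        rw [← Bool.not_not (pvQ _ x), ← hC, hkeep]; rfl
      have hstep : ∀ k, (acc ++ [x]).any (fun e => is_registry_parent_py e k)
          = (done ++ [x]).any (fun e => is_registry_parent_py e k) := by
        intro k
        rw [List.any_append, List.any_append, hacc k]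
      rw [ih (done ++ [x]) (acc ++ [x]) (by simp) hstep, List.filter_cons, hQx]
      simp

-- invariant tying A's (unique_keys, seen) to B's dict
def pvInv (st : List String × PySem.Set String) (d : PySem.Dict String String) : Prop :=
  st.1 = d.values ∧ (∀ s : String, PySem.Set.contains st.2 s = d.contains s) ∧
  (∀ kv ∈ d.items, kv.1 = PySem.Str.lower kv.2) ∧ (d.items.map Prod.fst).Nodup

theorem pv_dedup (raw : List String) :
    ∀ (st : List String × PySem.Set String) (d : PySem.Dict String String), pvInv st d →
    pvInv (raw.foldl
      (fun (st : List String × PySem.Set String) key =>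
        let normalized := PySem.Str.strip key
        if normalized == "" then st
        else
          let low := PySem.Str.lower normalized
          if PySem.Set.contains st.2 low then st
          else (st.1 ++ [normalized], PySem.Set.add st.2 low)) st)
      (raw.foldl
        (fun (d : PySem.Dict String String) key =>
          let normalized := PySem.Str.strip key
          if normalized == "" then d
          else d.setdefault (PySem.Str.lower normalized) normalized) d) := by
  induction raw with
  | nil => intro st d h; exact h
  | cons key rest ih =>
    intro st d h
    rw [List.foldl_cons, List.foldl_cons]
    apply ih
    obtain ⟨h1, h2, h3, h4⟩ := h
    by_cases hn : (PySem.Str.strip key == "") = true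
    · simp only [hn, if_pos]; exact ⟨h1, h2, h3, h4⟩
    · rw [Bool.not_eq_true] at hn
      simp only [hn, Bool.false_eq_true, if_false]
      by_cases hc : d.contains (PySem.Str.lower (PySem.Str.strip key)) = true
      · rw [PySem.Dict.setdefault_of_contains d _ hc, h2, hc, if_pos rfl]
        exact ⟨h1, h2, h3, h4⟩
      · rw [Bool.not_eq_true] at hc
        rw [PySem.Dict.setdefault_of_not_contains d _ hc, h2, hc]
        simp only [Bool.false_eq_true, if_false]
        have hitems := PySem.Dict.items_insert_of_not_contains d (PySem.Str.strip key) hc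
          (k := PySem.Str.lower (PySem.Str.strip key))
        refine ⟨?_, ?_, ?_, ?_⟩
        · simp only [PySem.Dict.values, hitems, List.map_append, List.map_cons, List.map_nil]
          rw [h1]; rfl
        · intro s
          have hsc : PySem.Set.contains st.2 (PySem.Str.lower (PySem.Str.strip key)) = false :=
            (h2 _).trans hc
          simp only [PySem.Set.add, PySem.Set.contains] at hsc ⊢
          simp only [hsc, Bool.false_eq_true, if_false]
          rw [PySem.Dict.contains_insert, Bool.eq_iff_iff]
          simp only [List.contains_iff_mem, List.mem_append, List.mem_singleton,
            Bool.or_eq_true, beq_iff_eq]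
          have h2s : s ∈ st.2 ↔ d.contains s = true := by
            rw [← h2 s]
            simp only [PySem.Set.contains]
            exact List.contains_iff_mem.symm
          rw [h2s]
          exact or_comm
        · intro kv hkv
          rw [hitems] at hkv
          rcases List.mem_append.mp hkv with hkv | hkv
          · exact h3 kv hkv
          · rcases List.mem_singleton.mp hkv with rfl; rfl
        · rw [hitems, List.map_append]
          simp only [List.map_cons, List.map_nil]
          rw [List.nodup_append]
          refine ⟨h4, List.nodup_singleton _, ?_⟩
          intro a ha b hb
          rw [List.mem_singleton] at hb
          subst hb
          intro heq
          have hca : d.contains (PySem.Str.lower (PySem.Str.strip key)) = true := by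
            obtain ⟨kv, hkv, hfst⟩ := List.mem_map.mp ha
            simp only [PySem.Dict.contains, List.any_eq_true]
            exact ⟨kv, hkv, by rw [hfst, heq]; simp⟩
          rw [hca] at hc
          simp at hc

-- the two ports agree on every input
theorem pv_main (raw : List String) :
    minimize_cleanup_keys_py raw = minimize_cleanup_keys_py_alt raw := by
  simp only [minimize_cleanup_keys_py, minimize_cleanup_keys_py_alt]
  obtain ⟨h1, h2, h3, h4⟩ := pv_dedup raw ([], PySem.Set.empty) PySem.Dict.empty
    ⟨rfl, fun _ => rfl, by intro kv hkv; simp [PySem.Dict.empty] at hkv,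
      by simp [PySem.Dict.empty]⟩
  set d := raw.foldl
    (fun (d : PySem.Dict String String) key =>
      let normalized := PySem.Str.strip key
      if normalized == "" then d
      else d.setdefault (PySem.Str.lower normalized) normalized) PySem.Dict.empty with hd
  set u := d.values with hu
  rw [h1]
  -- keys of the dict are injective images of its values under lower
  have hlownodup : (u.map PySem.Str.lower).Nodup := by
    have heq : u.map PySem.Str.lower = d.items.map Prod.fst := by
      simp only [hu, PySem.Dict.values, List.map_map]
      exact List.map_congr_left (fun kv hkv => (h3 kv hkv).symm)
    rw [heq]; exact h4
  have hinj : ∀ a ∈ u, ∀ b ∈ u, pvSortKey a = pvSortKey b → a = b := by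
    intro a ha b hb htk
    simp only [pvSortKey, List.cons.injEq] at htk
    have hchars : (PySem.Str.lower a).toList = (PySem.Str.lower b).toList := by
      have hinj' : Function.Injective Char.toNat := by
        intro x y hxy; exact Char.ext (UInt32.toNat_inj.mp hxy)
      exact List.map_injective_iff.mpr hinj' htk.2.2
    exact List.inj_on_of_nodup_map hlownodup ha hb (String.toList_injective hchars)
  have hu_nodup : u.Nodup := hlownodup.of_map
  set s := pvSortedByKey u with hs
  have hperm : s.Perm u := by
    simp only [hs, pvSortedByKey]
    exact @PySem.List.sorted_perm String (List Nat)
      (@Preorder.toLT _ (@PartialOrder.toPreorder _ (@LinearOrder.toPartialOrder _ List.instLinearOrder)))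
      (@LinearOrder.toDecidableLT _ List.instLinearOrder) u pvSortKey false
  have hpw : List.Pairwise (fun a b => pvSortKey a < pvSortKey b) s := by
    rw [List.pairwise_iff_getElem]
    intro i j hi hj hij
    have hle : pvSortKey s[i] ≤ pvSortKey s[j] := by
      simp only [hs, pvSortedByKey] at hj ⊢
      exact PySem.List.key_sorted_getElem_mono u pvSortKey (le_of_lt hij) hj
    rcases lt_or_eq_of_le hle with h | h
    · exact h
    · exfalso
      have hmi : s[i] ∈ u := hperm.mem_iff.mp (List.getElem_mem _)
      have hmj : s[j] ∈ u := hperm.mem_iff.mp (List.getElem_mem _)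
      have heq := hinj _ hmi _ hmj h
      have hsnodup : s.Nodup := hperm.nodup_iff.mpr hu_nodup
      have := hsnodup.getElem_inj_iff.mp heq
      omega
  -- A's greedy pass = filter by the closed-form predicate
  have hA : s.foldl (fun minimized key =>
      if minimized.any (fun existing => is_registry_parent_py existing key) then minimized
      else minimized ++ [key]) [] = s.filter (pvQ s) :=
    pv_greedy s hpw s [] [] rfl (fun _ => rfl)
  have hQQ : pvQ s = pvQ u := funext fun k => by
    simp only [pvQ]
    rw [hperm.any_eq]
  -- B's keyed pass is the filter of u by pvQ u
  have hB : ((u.map (fun k => (pvSortKey k, pvNorm k, k))).filter (fun t =>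
        ! (u.map (fun k => (pvSortKey k, pvNorm k, k))).any (fun s =>
            decide (s.1 < t.1) && pvIsAncestor s.2.1 t.2.1))).map (fun t => t.2.2)
      = u.filter (pvQ u) := by
    rw [List.filter_map, List.map_map]
    have hmapid : ∀ (l : List String),
        l.map ((fun (t : List Nat × List Char × String) => t.2.2) ∘
          (fun k => (pvSortKey k, pvNorm k, k))) = l := by
      intro l
      rw [show ((fun (t : List Nat × List Char × String) => t.2.2) ∘
          (fun k => (pvSortKey k, pvNorm k, k))) = id from by funext x; rfl]
      exact List.map_id l
    rw [hmapid]
    apply List.filter_congr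
    intro k _
    simp only [Function.comp_apply, pvQ]
    congr 1
    rw [List.any_map]
    apply PySem.List.any_congr_mem
    intro p _
    simp only [Function.comp_apply]
    rw [pv_anc_eq]
  rw [hA, hQQ, hB]
  simp only [pvSortedByKey]
  exact (PySem.List.sorted_eq_of_perm_of_pairwise_lt _ _ pvSortKey (hperm.filter _)
    (hpw.sublist List.filter_sublist)).symm

-- ===== VERDICT (by name: the statement is the Claim_ definition above) =====
theorem minimize_cleanup_keys_py_spec : Claim_equal_minimize_cleanup_keys_py := by
  intro raw _
  unfold Spec_minimize_cleanup_keys_py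
  exact pv_main raw
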